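-- pv_equiv track=rewrite | github.com/emram120/LAP-Token | 28.py | categorize_parameters
-- ===== SOURCE A (Python) =====
-- def categorize_parameters(materials_data):
--     """دسته‌بندی پارامترها به درصدی و غیر درصدی"""
--     percentage_params = set()
--     non_percentage_params = set()
--
--     for material, params in materials_data.items():
--         for param in params.keys():
--             if "(%)" in param:  # شناسایی پارامترهای درصدی
--                 percentage_params.add(param)
--             else:  # شناسایی پارامترهای غیر درصدی
--                 non_percentage_params.add(param)
--
--     return percentage_params, non_percentage_params
-- ===== SOURCE B (Python) =====
-- def categorize_parameters(materials_data):
--     """دسته‌بندی پارامترها به درصدی و غیر درصدی"""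
--     key_lists = [list(params.keys()) for params in materials_data.values()]
--
--     def go(lists):
--         if len(lists) == 0:
--             return set(), set()
--         if len(lists) == 1:
--             keys = lists[0]
--             perc = {k for k in keys if "(%)" in k}
--             return perc, set(keys) - perc
--         mid = len(lists) // 2
--         p1, n1 = go(lists[:mid])
--         p2, n2 = go(lists[mid:])
--         return p1 | p2, n1 | n2
--
--     return go(key_lists)
-- ===== Notes on version B (the rewrite author's own statement) =====
-- stated objective: alternative
-- what changed: B is a divide-and-conquer recursion: it halves the list of per-material key lists, solves each half recursively (the singleton base case derives the non-percentage part by set difference), and merges the two half-results with set unions, instead of A's single nested loop routing each key into one of two accumulator sets.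
import Mathlib
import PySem

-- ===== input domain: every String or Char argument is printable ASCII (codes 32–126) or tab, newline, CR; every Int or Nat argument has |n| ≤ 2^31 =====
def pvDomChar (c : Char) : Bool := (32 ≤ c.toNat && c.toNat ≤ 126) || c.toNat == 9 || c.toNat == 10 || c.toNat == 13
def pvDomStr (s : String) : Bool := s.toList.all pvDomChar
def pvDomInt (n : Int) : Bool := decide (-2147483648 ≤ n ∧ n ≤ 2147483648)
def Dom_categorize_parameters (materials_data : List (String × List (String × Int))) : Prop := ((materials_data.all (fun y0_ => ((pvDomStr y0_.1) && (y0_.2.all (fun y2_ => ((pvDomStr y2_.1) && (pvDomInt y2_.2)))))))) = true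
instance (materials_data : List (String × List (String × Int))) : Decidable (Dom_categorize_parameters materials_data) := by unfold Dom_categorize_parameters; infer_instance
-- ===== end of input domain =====

-- B replaces A's linear routing loop by a divide-and-conquer recursion over the per-material
-- key lists, merging the half-results with set unions (objective: alternative decomposition).
-- ===== PORT A =====
def categorize_parameters (materials_data : List (String × List (String × Int))) : List String × List String :=
  let init : PySem.Set String × PySem.Set String := (PySem.Set.empty, PySem.Set.empty)
  let res := materials_data.foldl (fun st mp =>
    mp.2.foldl (fun (st : PySem.Set String × PySem.Set String) kv =>
      if PySem.Str.isIn "(%)" kv.1 then (PySem.Set.add st.1 kv.1, st.2)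
      else (st.1, PySem.Set.add st.2 kv.1)) st) init
  (res.1, res.2)

-- ===== PORT B =====
-- Source B's recursive helper `go`.  lists[0] with len(lists) = 1 is ported as headD [] (exact
-- there); lists[:mid] / lists[mid:] with 0 ≤ mid ≤ len are exactly List.take / List.drop,
-- and len(lists) // 2 on a nonnegative length is Nat division.
def pvGo (lists : List (List String)) : PySem.Set String × PySem.Set String :=
  if lists.length = 0 then (PySem.Set.empty, PySem.Set.empty)
  else if lists.length = 1 then
    let keys := lists.headD []
    let perc := PySem.Set.ofList (keys.filter (fun k => PySem.Str.isIn "(%)" k))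
    (perc, PySem.Set.diff (PySem.Set.ofList keys) perc)
  else
    let mid := lists.length / 2
    let r1 := pvGo (lists.take mid)
    let r2 := pvGo (lists.drop mid)
    (PySem.Set.union r1.1 r2.1, PySem.Set.union r1.2 r2.2)
termination_by lists.length
decreasing_by
  · simp only [List.length_take]; omega
  · simp only [List.length_drop]; omega

def categorize_parameters_alt (materials_data : List (String × List (String × Int))) : List String × List String :=
  let key_lists := materials_data.map (fun mp => mp.2.map Prod.fst)
  pvGo key_lists

-- ===== PRECONDITION & SPEC =====
def Spec_categorize_parameters (materials_data : List (String × List (String × Int))) (out : List String × List String) : Prop := out = categorize_parameters_alt materials_data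
instance (materials_data : List (String × List (String × Int))) (out : List String × List String) : Decidable (Spec_categorize_parameters materials_data out) := by unfold Spec_categorize_parameters; infer_instance

-- ===== CLAIM (what is proved, stated in full; the proofs are below) =====
def Claim_equal_categorize_parameters : Prop := ∀ (materials_data : List (String × List (String × Int))), Dom_categorize_parameters materials_data → Spec_categorize_parameters materials_data (categorize_parameters materials_data)

-- ===== LEMMAS AND PROOFS =====

-- abbreviation for the predicate used by both programs
def pvPred (p : String) : Bool := PySem.Str.isIn "(%)" p

-- A's inner loop routes each key into one of the two sets; expressed as two updates.
theorem pvInner (l : List (String × Int)) (s t : PySem.Set String) :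
    l.foldl (fun (st : PySem.Set String × PySem.Set String) kv =>
      if PySem.Str.isIn "(%)" kv.1 then (PySem.Set.add st.1 kv.1, st.2)
      else (st.1, PySem.Set.add st.2 kv.1)) (s, t)
    = (PySem.Set.update s ((l.map Prod.fst).filter pvPred),
       PySem.Set.update t ((l.map Prod.fst).filter (fun k => !pvPred k))) := by
  induction l generalizing s t with
  | nil => rfl
  | cons kv l ih =>
      simp only [List.foldl_cons, List.map_cons, List.filter_cons]
      cases hq : pvPred kv.1 with
      | false =>
          have hL : PySem.Str.isIn "(%)" kv.1 = false := hq
          simp only [hL, Bool.not_false, Bool.false_eq_true, if_false, if_true]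
          rw [ih, PySem.Set.update_cons]
      | true =>
          have hL : PySem.Str.isIn "(%)" kv.1 = true := hq
          simp only [hL, Bool.not_true, Bool.false_eq_true, if_false, if_true]
          rw [ih, PySem.Set.update_cons]

-- A's outer loop over all materials.
theorem pvOuterA (md : List (String × List (String × Int))) (s t : PySem.Set String) :
    md.foldl (fun st mp =>
      mp.2.foldl (fun (st : PySem.Set String × PySem.Set String) kv =>
        if PySem.Str.isIn "(%)" kv.1 then (PySem.Set.add st.1 kv.1, st.2)
        else (st.1, PySem.Set.add st.2 kv.1)) st) (s, t)
    = (PySem.Set.update s ((md.flatMap (fun mp => mp.2.map Prod.fst)).filter pvPred),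
       PySem.Set.update t ((md.flatMap (fun mp => mp.2.map Prod.fst)).filter (fun k => !pvPred k))) := by
  induction md generalizing s t with
  | nil => rfl
  | cons mp md ih =>
      simp only [List.foldl_cons, pvInner, ih, List.flatMap_cons, List.filter_append,
        PySem.Set.update_append]

-- filter commutes with Set.add
theorem pvFilterAdd (q : String → Bool) (s : PySem.Set String) (x : String) :
    (PySem.Set.add s x).filter q
    = if q x = true then PySem.Set.add (s.filter q) x else s.filter q := by
  by_cases hm : x ∈ s
  · rw [PySem.Set.add_of_mem hm]
    by_cases hq : q x = true
    · rw [if_pos hq, PySem.Set.add_of_mem (List.mem_filter.mpr ⟨hm, hq⟩)]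
    · rw [if_neg hq]
  · rw [PySem.Set.add_of_not_mem hm, List.filter_append]
    by_cases hq : q x = true
    · rw [if_pos hq, PySem.Set.add_of_not_mem (fun hc => hm (List.mem_filter.mp hc).1)]
      simp [hq]
    · simp [hq]

-- filter commutes with the dedup performed by folding Set.add
theorem pvFilterFoldAdd (q : String → Bool) (F : List String) (s : PySem.Set String) :
    (F.foldl PySem.Set.add s).filter q = (F.filter q).foldl PySem.Set.add (s.filter q) := by
  induction F generalizing s with
  | nil => rfl
  | cons x F ih =>
      simp only [List.foldl_cons, List.filter_cons, ih, pvFilterAdd]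
      cases hq : q x <;> simp

theorem pvFilterOfList (q : String → Bool) (F : List String) :
    (PySem.Set.ofList F).filter q = PySem.Set.ofList (F.filter q) := by
  rw [PySem.Set.ofList_eq_foldl, PySem.Set.ofList_eq_foldl, pvFilterFoldAdd]
  rfl

-- set(keys) - {k in keys | pred k}  =  {k in keys | ¬ pred k}
theorem pvDiffFilter (F : List String) :
    PySem.Set.diff (PySem.Set.ofList F) (PySem.Set.ofList (F.filter pvPred))
    = PySem.Set.ofList (F.filter (fun k => !pvPred k)) := by
  have hdiff : PySem.Set.diff (PySem.Set.ofList F) (PySem.Set.ofList (F.filter pvPred))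
      = (PySem.Set.ofList F).filter
          (fun x => !(PySem.Set.contains (PySem.Set.ofList (F.filter pvPred)) x)) := rfl
  rw [hdiff, ← pvFilterOfList (fun k => !pvPred k) F]
  apply List.filter_congr
  intro x hx
  have hmem : x ∈ PySem.Set.ofList (List.filter pvPred F) ↔ pvPred x = true := by
    rw [PySem.Set.mem_ofList, List.mem_filter]
    exact ⟨fun h => h.2, fun h => ⟨(PySem.Set.mem_ofList _ _).mp hx, h⟩⟩
  have hc : PySem.Set.contains (PySem.Set.ofList (List.filter pvPred F)) x = pvPred x := by
    cases hq : pvPred x with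
    | true => exact (PySem.Set.contains_iff _ _).mpr (hmem.mpr hq)
    | false =>
        rw [Bool.eq_false_iff]
        intro h
        exact absurd (hmem.mp ((PySem.Set.contains_iff _ _).mp h)) (by simp [hq])
  rw [hc]

-- updating with a list already containing x never changes anything further for x:
-- removing x from the update list is harmless once x ∈ s.
theorem pvUpdateDiscard (x : String) (l : List String) (s : PySem.Set String)
    (hx : x ∈ s) :
    PySem.Set.update s (l.filter (fun y => !(y == x))) = PySem.Set.update s l := by
  induction l generalizing s with
  | nil => rfl
  | cons y l ih =>
      simp only [List.filter_cons]
      by_cases hy : y = x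
      · subst hy
        simp only [BEq.rfl, Bool.not_true, Bool.false_eq_true, if_false,
          PySem.Set.update_cons, PySem.Set.add_of_mem hx]
        exact ih s hx
      · have : (y == x) = false := by simp [hy]
        simp only [this, Bool.not_false, if_true, PySem.Set.update_cons]
        exact ih _ ((PySem.Set.mem_add _ _ _).mpr (Or.inl hx))

-- updating with set(xs) is the same as updating with xs
theorem pvUpdateOfList (l : List String) (s : PySem.Set String) :
    PySem.Set.update s (PySem.Set.ofList l) = PySem.Set.update s l := by
  induction l generalizing s with
  | nil => rfl
  | cons x l ih =>
      rw [PySem.Set.ofList_cons, PySem.Set.update_cons, PySem.Set.update_cons]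
      have hdisc : (PySem.Set.discard (PySem.Set.ofList l) x)
          = (PySem.Set.ofList l).filter (fun y => !(y == x)) := rfl
      rw [hdisc]
      have hx : x ∈ PySem.Set.add s x := (PySem.Set.mem_add _ _ _).mpr (Or.inr rfl)
      calc PySem.Set.update (PySem.Set.add s x) ((PySem.Set.ofList l).filter (fun y => !(y == x)))
          = PySem.Set.update (PySem.Set.add s x) (PySem.Set.ofList l) := by
            -- ofList l is itself built by update from empty; apply pvUpdateDiscard
            exact pvUpdateDiscard x (PySem.Set.ofList l) (PySem.Set.add s x) hx
        _ = PySem.Set.update (PySem.Set.add s x) l := ih _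

-- union of two set()s of lists is set() of the concatenation
theorem pvUnionOfList (a b : List String) :
    PySem.Set.union (PySem.Set.ofList a) (PySem.Set.ofList b)
    = PySem.Set.ofList (a ++ b) := by
  have hu : PySem.Set.union (PySem.Set.ofList a) (PySem.Set.ofList b)
      = PySem.Set.update (PySem.Set.ofList a) (PySem.Set.ofList b) := rfl
  rw [hu, pvUpdateOfList, PySem.Set.ofList_append]

-- characterization of B's divide-and-conquer helper
theorem pvGoEq (lists : List (List String)) :
    pvGo lists = (PySem.Set.ofList (lists.flatten.filter pvPred),
                  PySem.Set.ofList (lists.flatten.filter (fun k => !pvPred k))) := by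
  induction lists using pvGo.induct with
  | case1 lists h0 =>
      have : lists = [] := List.length_eq_zero_iff.mp h0
      subst this
      rw [pvGo]
      rfl
  | case2 lists h0 h1 =>
      obtain ⟨keys, hk⟩ : ∃ k, lists = [k] := List.length_eq_one_iff.mp h1
      subst hk
      rw [pvGo]
      simp only [List.length_cons, List.length_nil, List.flatten_cons, List.flatten_nil,
        List.append_nil, List.headD_cons, if_neg (by omega : ¬ (1 = 0))]
      exact Prod.ext rfl (pvDiffFilter keys)
  | case3 lists h0 h1 mid ih1 ih2 =>
      rw [pvGo]
      simp only [if_neg h0, if_neg h1]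
      rw [show lists.length / 2 = mid from rfl, ih1, ih2]
      simp only [pvUnionOfList, ← List.filter_append, ← List.flatten_append,
        List.take_append_drop]

-- ===== VERDICT (by name: the statement is the Claim_ definition above) =====
theorem categorize_parameters_spec : Claim_equal_categorize_parameters := by
  intro md _
  show categorize_parameters md = categorize_parameters_alt md
  unfold categorize_parameters categorize_parameters_alt
  dsimp only
  rw [pvOuterA md PySem.Set.empty PySem.Set.empty, pvGoEq]
  have hflat : (md.map (fun mp => mp.2.map Prod.fst)).flatten
      = md.flatMap (fun mp => mp.2.map Prod.fst) := List.flatMap_def.symm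
  rw [hflat]
  rfl
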